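-- pv_equiv track=rewrite | github.com/calledit/x86_x64_function_tracer | hook_lib.py | _is_protection_readable
-- ===== SOURCE A (Python) =====
-- PAGE_READWRITE = 0x04
--
-- PAGE_EXECUTE_READ = 0x20
--
-- PAGE_EXECUTE_READWRITE    = 0x40
--
-- PAGE_WRITECOPY            = 0x08
--
-- PAGE_GUARD                 = 0x100
--
-- PAGE_NOACCESS              = 0x01
--
-- PAGE_READONLY              = 0x02
--
-- PAGE_EXECUTE_WRITECOPY     = 0x80
--
-- def _is_protection_readable(prot: int) -> bool:
--     """Return True if protection flags include readable permissions and are not guard/noaccess."""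
--     if prot & PAGE_GUARD:
--         return False
--     if prot == PAGE_NOACCESS:
--         return False
--     readable = (PAGE_READONLY, PAGE_READWRITE, PAGE_WRITECOPY,
--                 PAGE_EXECUTE_READ, PAGE_EXECUTE_READWRITE, PAGE_EXECUTE_WRITECOPY)
--     return any(prot & flag == flag for flag in readable)
-- ===== SOURCE B (Python) =====
-- PAGE_READWRITE = 0x04
-- PAGE_EXECUTE_READ = 0x20
-- PAGE_EXECUTE_READWRITE = 0x40
-- PAGE_WRITECOPY = 0x08
-- PAGE_GUARD = 0x100
-- PAGE_NOACCESS = 0x01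
-- PAGE_READONLY = 0x02
-- PAGE_EXECUTE_WRITECOPY = 0x80
--
--
-- def _build_readable_table():
--     """Precompute readability for every 9-bit protection pattern (8 flag bits + PAGE_GUARD)."""
--     readable_flags = (PAGE_READONLY, PAGE_READWRITE, PAGE_WRITECOPY,
--                       PAGE_EXECUTE_READ, PAGE_EXECUTE_READWRITE, PAGE_EXECUTE_WRITECOPY)
--     table = []
--     for r in range(512):
--         ok = False
--         for f in readable_flags:
--             if r & f:
--                 ok = True
--         if r & PAGE_GUARD:
--             ok = False
--         table.append(ok)
--     return table
--
--
-- _READABLE_TABLE = _build_readable_table()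
--
--
-- def _is_protection_readable(prot: int) -> bool:
--     """Return True if protection flags include readable permissions and are not guard/noaccess."""
--     return _READABLE_TABLE[prot & 0x1FF]
-- ===== Notes on version B (the rewrite author's own statement) =====
-- stated objective: alternative
-- what changed: Replaced A's per-call branch chain plus any() over six flag constants by a 512-entry lookup table precomputed once over all 9-bit patterns (8 protection bits + PAGE_GUARD); the function itself is a single table index on prot & 0x1FF.
import Mathlib
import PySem

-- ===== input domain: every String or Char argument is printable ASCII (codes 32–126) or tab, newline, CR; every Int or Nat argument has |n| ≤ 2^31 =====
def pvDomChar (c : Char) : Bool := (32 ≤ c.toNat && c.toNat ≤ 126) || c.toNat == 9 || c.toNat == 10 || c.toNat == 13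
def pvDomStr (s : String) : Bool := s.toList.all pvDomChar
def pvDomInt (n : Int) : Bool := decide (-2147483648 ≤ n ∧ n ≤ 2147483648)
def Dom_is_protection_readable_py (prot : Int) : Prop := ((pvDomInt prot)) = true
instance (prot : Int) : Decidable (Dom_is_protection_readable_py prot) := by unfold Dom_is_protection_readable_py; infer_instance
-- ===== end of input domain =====

-- B replaces A's per-call guard/noaccess branches plus any() over six flags by a 512-entry
-- lookup table precomputed over all 9-bit patterns, indexed by prot & 0x1FF; objective: alternative.

-- ===== PORT A =====
def PAGE_READWRITE : Int := 0x04
def PAGE_EXECUTE_READ : Int := 0x20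
def PAGE_EXECUTE_READWRITE : Int := 0x40
def PAGE_WRITECOPY : Int := 0x08
def PAGE_GUARD : Int := 0x100
def PAGE_NOACCESS : Int := 0x01
def PAGE_READONLY : Int := 0x02
def PAGE_EXECUTE_WRITECOPY : Int := 0x80

def is_protection_readable_py (prot : Int) : Bool :=
  if PySem.Int.band prot PAGE_GUARD ≠ 0 then false
  else if prot = PAGE_NOACCESS then false
  else
    [PAGE_READONLY, PAGE_READWRITE, PAGE_WRITECOPY,
     PAGE_EXECUTE_READ, PAGE_EXECUTE_READWRITE, PAGE_EXECUTE_WRITECOPY].any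
      (fun flag => PySem.Int.band prot flag == flag)

-- ===== PORT B =====
def pvReadableFlags : List Int :=
  [PAGE_READONLY, PAGE_READWRITE, PAGE_WRITECOPY,
   PAGE_EXECUTE_READ, PAGE_EXECUTE_READWRITE, PAGE_EXECUTE_WRITECOPY]

-- one table entry, as computed by the inner loop body of _build_readable_table
def pvTableEntry (r : Int) : Bool :=
  let ok := pvReadableFlags.foldl (fun ok f => if PySem.Int.band r f ≠ 0 then true else ok) false
  if PySem.Int.band r PAGE_GUARD ≠ 0 then false else ok

-- the append loop over range(512) becomes a map over pyRange
def pvReadableTable : List Bool := (PySem.List.pyRange 0 512 1).map pvTableEntry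

def is_protection_readable_py_alt (prot : Int) : Bool :=
  -- the index prot & 0x1FF always lies in [0, 512), so the lookup never raises; getD's default is unreachable
  (PySem.List.pyGet? pvReadableTable (PySem.Int.band prot 0x1FF)).getD false

-- ===== PRECONDITION & SPEC =====
def Spec_is_protection_readable_py (prot : Int) (out : Bool) : Prop := out = is_protection_readable_py_alt prot
instance (prot : Int) (out : Bool) : Decidable (Spec_is_protection_readable_py prot out) := by unfold Spec_is_protection_readable_py; infer_instance

-- ===== CLAIM =====
def Claim_equal_is_protection_readable_py : Prop := ∀ (prot : Int), Dom_is_protection_readable_py prot → Spec_is_protection_readable_py prot (is_protection_readable_py prot)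

-- ===== LEMMAS AND PROOFS =====

lemma pv_nat_and_mod (n m : Nat) (hm : m &&& 511 = m) : n &&& m = (n % 512) &&& m := by
  calc n &&& m = n &&& (511 &&& m) := by rw [Nat.and_comm 511 m, hm]
    _ = (n &&& 511) &&& m := (Nat.and_assoc n 511 m).symm
    _ = (n % 512) &&& m := by rw [show (511:Nat) = 2^9 - 1 from rfl, Nat.and_two_pow_sub_one_eq_mod]

lemma pv_band_pos (a : Int) (ha : 0 ≤ a) (m : Nat) :
    PySem.Int.band a (m:Int) = ((a.toNat &&& m : Nat) : Int) := by
  simp [PySem.Int.band, ha]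

lemma pv_band_neg (a : Int) (ha : a < 0) (m : Nat) :
    PySem.Int.band a (m:Int) = ((m - (m &&& (-a-1).toNat) : Nat) : Int) := by
  simp [PySem.Int.band, not_le.mpr ha, (by omega : (0:Int) ≤ (m:Int))]

-- the low 9 bits of a (as a Nat in [0,512)) determine a & m for every m ⊆ 0x1FF
lemma pv_band_via_residue (m : Nat) (hm : m &&& 511 = m)
    (hc : ∀ s < 512, m - (m &&& s) = (511 - s) &&& m) (a : Int) :
    PySem.Int.band a (m:Int) = (((PySem.Int.band a 511).toNat &&& m : Nat) : Int) := by
  by_cases ha : 0 ≤ a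
  · rw [show (511:Int) = ((511:Nat):Int) from rfl, pv_band_pos a ha 511, pv_band_pos a ha m,
      Int.toNat_natCast]
    congr 1
    rw [Nat.and_assoc, Nat.and_comm 511 m, hm]
  · have ha : a < 0 := by omega
    rw [show (511:Int) = ((511:Nat):Int) from rfl, pv_band_neg a ha 511, pv_band_neg a ha m,
      Int.toNat_natCast]
    congr 1
    have h511 : 511 &&& (-a-1).toNat = (-a-1).toNat % 512 := by
      rw [Nat.and_comm, show (511:Nat) = 2^9 - 1 from rfl, Nat.and_two_pow_sub_one_eq_mod]
    have hms : m &&& (-a-1).toNat = m &&& ((-a-1).toNat % 512) := by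
      rw [Nat.and_comm m, pv_nat_and_mod _ m hm, Nat.and_comm]
    rw [h511, hms]
    exact hc _ (Nat.mod_lt _ (by norm_num))

set_option maxRecDepth 20000 in
lemma pv_hc2 : ∀ s < 512, 2 - (2 &&& s) = (511 - s) &&& 2 := by decide
set_option maxRecDepth 20000 in
lemma pv_hc4 : ∀ s < 512, 4 - (4 &&& s) = (511 - s) &&& 4 := by decide
set_option maxRecDepth 20000 in
lemma pv_hc8 : ∀ s < 512, 8 - (8 &&& s) = (511 - s) &&& 8 := by decide
set_option maxRecDepth 20000 in
lemma pv_hc32 : ∀ s < 512, 32 - (32 &&& s) = (511 - s) &&& 32 := by decide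
set_option maxRecDepth 20000 in
lemma pv_hc64 : ∀ s < 512, 64 - (64 &&& s) = (511 - s) &&& 64 := by decide
set_option maxRecDepth 20000 in
lemma pv_hc128 : ∀ s < 512, 128 - (128 &&& s) = (511 - s) &&& 128 := by decide
set_option maxRecDepth 20000 in
lemma pv_hc256 : ∀ s < 512, 256 - (256 &&& s) = (511 - s) &&& 256 := by decide

lemma pv_residue_lt (a : Int) : (PySem.Int.band a 511).toNat < 512 := by
  by_cases ha : 0 ≤ a
  · rw [show (511:Int) = ((511:Nat):Int) from rfl, pv_band_pos a ha, Int.toNat_natCast]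
    have : a.toNat &&& 511 ≤ 511 := Nat.and_le_right
    omega
  · rw [show (511:Int) = ((511:Nat):Int) from rfl, pv_band_neg a (by omega), Int.toNat_natCast]
    omega

-- for every 9-bit residue, A's branch chain agrees with the precomputed table entry
set_option maxRecDepth 20000 in
lemma pv_table_correct : ∀ n < 512,
    (if (((n &&& 256 : Nat) : Int)) ≠ 0 then false
     else ((((n &&& 2 : Nat) : Int) == (((2:Nat)):Int)) ||
           ((((n &&& 4 : Nat) : Int) == (((4:Nat)):Int)) ||
           ((((n &&& 8 : Nat) : Int) == (((8:Nat)):Int)) ||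
           ((((n &&& 32 : Nat) : Int) == (((32:Nat)):Int)) ||
           ((((n &&& 64 : Nat) : Int) == (((64:Nat)):Int)) ||
           ((((n &&& 128 : Nat) : Int) == (((128:Nat)):Int)) || false))))))) = pvTableEntry (n : Int) := by
  decide

lemma pv_lookup (n : Nat) (hn : n < 512) :
    (PySem.List.pyGet? pvReadableTable ((n:Nat) : Int)).getD false = pvTableEntry (n : Int) := by
  unfold pvReadableTable
  rw [PySem.List.pyGet?_natCast, show (512:Int) = ((512:Nat):Int) from rfl,
    PySem.List.getElem?_map_pyRange_zero pvTableEntry 512 n hn]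
  rfl

-- ===== VERDICT =====
theorem is_protection_readable_py_spec : Claim_equal_is_protection_readable_py := by
  intro prot _
  unfold Spec_is_protection_readable_py is_protection_readable_py is_protection_readable_py_alt
  set n := (PySem.Int.band prot 511).toNat with hn
  have hlt : n < 512 := pv_residue_lt prot
  have hpos : 0 ≤ PySem.Int.band prot 511 := by
    rw [PySem.Int.band_comm]
    exact PySem.Int.band_nonneg_of_nonneg_left prot (by norm_num)
  have hres : PySem.Int.band prot 511 = ((n : Nat) : Int) := by
    rw [hn, Int.toNat_of_nonneg hpos]
  rw [show (0x1FF : Int) = (511:Int) from rfl, hres, pv_lookup n hlt]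
  by_cases h1 : prot = PAGE_NOACCESS
  · subst h1
    have hn1 : n = 1 := by
      have h := hres
      rw [show PySem.Int.band PAGE_NOACCESS 511 = (1:Int) from by decide] at h
      exact_mod_cast h.symm
    rw [hn1]
    decide
  · have hb2 := pv_band_via_residue 2 (by decide) pv_hc2 prot
    have hb4 := pv_band_via_residue 4 (by decide) pv_hc4 prot
    have hb8 := pv_band_via_residue 8 (by decide) pv_hc8 prot
    have hb32 := pv_band_via_residue 32 (by decide) pv_hc32 prot
    have hb64 := pv_band_via_residue 64 (by decide) pv_hc64 prot
    have hb128 := pv_band_via_residue 128 (by decide) pv_hc128 prot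
    have hb256 := pv_band_via_residue 256 (by decide) pv_hc256 prot
    rw [if_neg h1]
    simp only [PAGE_GUARD, PAGE_READONLY, PAGE_READWRITE, PAGE_WRITECOPY,
      PAGE_EXECUTE_READ, PAGE_EXECUTE_READWRITE, PAGE_EXECUTE_WRITECOPY,
      List.any_cons, List.any_nil]
    simp only [show (0x100:Int) = ((256:Nat):Int) from rfl, show (0x02:Int) = ((2:Nat):Int) from rfl,
      show (0x04:Int) = ((4:Nat):Int) from rfl, show (0x08:Int) = ((8:Nat):Int) from rfl,
      show (0x20:Int) = ((32:Nat):Int) from rfl, show (0x40:Int) = ((64:Nat):Int) from rfl,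
      show (0x80:Int) = ((128:Nat):Int) from rfl]
    simp only [hb2, hb4, hb8, hb32, hb64, hb128, hb256]
    exact pv_table_correct n hlt
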